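-- pv_equiv track=rewrite | github.com/eloqlo/Code_Interview | 200sol/programers/field.py | solution
-- ===== SOURCE A (Python) =====
-- def solution(array):
--     # O(N)
--     minval=1000
--     flag=False
--     for i in range(len(array)):
--
--         if array[i]<minval:
--             minval=array[i]
--             flag = False
--         elif array[i]==minval:
--             flag = True
--     if flag:
--         return -1
--     else:
--         return minval
-- ===== SOURCE B (Python) =====
-- def solution(array):
--     arr = [1000] + list(array)
--     m = min(arr)
--     return -1 if arr.count(m) >= 2 else m
-- ===== Notes on version B (the rewrite author's own statement) =====
-- stated objective: simpler
-- what changed: Replaces the stateful running-min-plus-flag loop (with resets) by two library scans over the list with the 1000 sentinel as a phantom leading element: min once, count of the min once, -1 iff the count is at least 2.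
import Mathlib
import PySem

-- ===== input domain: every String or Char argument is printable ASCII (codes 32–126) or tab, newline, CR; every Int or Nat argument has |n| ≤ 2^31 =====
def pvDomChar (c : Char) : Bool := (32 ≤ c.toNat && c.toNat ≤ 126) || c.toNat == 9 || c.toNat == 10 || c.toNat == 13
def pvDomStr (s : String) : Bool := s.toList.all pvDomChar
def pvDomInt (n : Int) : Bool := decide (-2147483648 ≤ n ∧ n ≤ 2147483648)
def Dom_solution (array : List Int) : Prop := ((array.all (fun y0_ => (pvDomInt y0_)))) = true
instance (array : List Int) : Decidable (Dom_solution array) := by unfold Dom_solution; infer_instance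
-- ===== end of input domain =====

-- B replaces A's stateful running-min + duplicate-flag loop by two plain scans
-- (min, then count of the min) over the list with the 1000 sentinel prepended; objective: simpler.

-- ===== PORT A =====
-- the loop body: running minval with a duplicate flag that resets on a new minimum
def solutionStep (s : Int × Bool) (x : Int) : Int × Bool :=
  if x < s.1 then (x, false)
  else if x == s.1 then (s.1, true)
  else s

def solution (array : List Int) : Int :=
  let r := array.foldl solutionStep (1000, false)
  if r.2 then -1 else r.1

-- ===== PORT B =====
def solution_alt (array : List Int) : Int :=
  let arr := 1000 :: array
  let m := (PySem.List.min? arr (fun y => y)).getD 0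
  if 2 ≤ arr.count m then -1 else m

-- ===== PRECONDITION & SPEC =====
def Spec_solution (array : List Int) (out : Int) : Prop := out = solution_alt array
instance (array : List Int) (out : Int) : Decidable (Spec_solution array out) := by unfold Spec_solution; infer_instance

-- ===== CLAIM (what is proved, stated in full; the proofs are below) =====
def Claim_equal_solution : Prop := ∀ (array : List Int), Dom_solution array → Spec_solution array (solution array)

-- ===== LEMMAS AND PROOFS =====

-- the running minimum is below its seed
theorem foldl_min_le (xs : List Int) (a : Int) : xs.foldl min a ≤ a := by
  induction xs generalizing a with
  | nil => simp
  | cons y ys ihy => exact le_trans (ihy (min a y)) (min_le_left a y)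
theorem solutionStep_foldl (l : List Int) (m : Int) (f : Bool) :
    l.foldl solutionStep (m, f)
      = (l.foldl min m, decide (2 ≤ (m :: l).count (l.foldl min m) ∨ (f = true ∧ l.foldl min m = m))) := by
  induction l generalizing m f with
  | nil => by_cases h : f = true <;> simp [h]
  | cons x xs ih =>
    simp only [List.foldl_cons, solutionStep]
    by_cases h1 : x < m
    · have hm : min m x = x := by omega
      rw [if_pos (by exact h1), ih]
      have hM : xs.foldl min x ≤ x := foldl_min_le xs x
      have hNe : xs.foldl min x ≠ m := by omega
      simp only [hm, Prod.mk.injEq, true_and, decide_eq_decide, List.count_cons, beq_iff_eq]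
      constructor <;> intro h
      · rcases h with h | h
        · left; split_ifs at h ⊢ <;> omega
        · simp at h
      · rcases h with h | h
        · left; split_ifs at h ⊢ <;> omega
        · exact absurd h.2 hNe
    · by_cases h2 : x = m
      · rw [if_neg h1, if_pos (by simp [h2]), ih]
        subst h2
        have hM : xs.foldl min x ≤ x := foldl_min_le xs x
        simp only [min_self, Prod.mk.injEq, true_and, decide_eq_decide, List.count_cons, beq_iff_eq]
        by_cases hE : xs.foldl min x = x
        · simp [hE]
        · simp only [hE, and_false, or_false, false_and, false_or]
          split_ifs <;> omega
      · have hx : ¬ (x == m) = true := by simp [h2]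
        rw [if_neg h1, if_neg hx, ih]
        have hm : min m x = m := by omega
        have hM : xs.foldl min m ≤ m := foldl_min_le xs m
        have hxM : xs.foldl min m ≠ x := by omega
        simp only [hm, Prod.mk.injEq, true_and, decide_eq_decide, List.count_cons, beq_iff_eq]
        constructor <;> intro h
        · rcases h with h | h
          · left; split_ifs at h ⊢ <;> omega
          · right; exact h
        · rcases h with h | h
          · left; split_ifs at h ⊢ <;> omega
          · right; exact h

-- ===== VERDICT (by name: the statement is the Claim_ definition above) =====
theorem solution_spec : Claim_equal_solution := by
  intro array _
  unfold Spec_solution solution solution_alt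
  rw [solutionStep_foldl]
  dsimp only
  rw [PySem.List.min?_id_cons]
  simp only [Option.getD_some, false_and, decide_eq_true_eq]
  split_ifs <;> simp_all
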